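-- pv_equiv track=rewrite | github.com/Rotten120/python_string_manipulation_programs_source_code | batch_2/is_lower.py | is_lower
-- ===== SOURCE A (Python) =====
-- def is_lower(word):
--     char_code_A = ord('A')
--     char_code_Z = ord('Z')
--     is_all_lower = True
--
--     for char in word:
--         if char_code_A <= ord(char) <= char_code_Z:
--             return False
--     return is_all_lower
-- ===== SOURCE B (Python) =====
-- UPPER = set("ABCDEFGHIJKLMNOPQRSTUVWXYZ")
--
-- def is_lower(word):
--     return not (set(word) & UPPER)
-- ===== Notes on version B (the rewrite author's own statement) =====
-- stated objective: idiomatic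
-- what changed: Replaces the per-character ord-range loop with early return by building the set of distinct characters once and intersecting it with a fixed uppercase set; C-level set operations give a constant-factor speedup.
import Mathlib
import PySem

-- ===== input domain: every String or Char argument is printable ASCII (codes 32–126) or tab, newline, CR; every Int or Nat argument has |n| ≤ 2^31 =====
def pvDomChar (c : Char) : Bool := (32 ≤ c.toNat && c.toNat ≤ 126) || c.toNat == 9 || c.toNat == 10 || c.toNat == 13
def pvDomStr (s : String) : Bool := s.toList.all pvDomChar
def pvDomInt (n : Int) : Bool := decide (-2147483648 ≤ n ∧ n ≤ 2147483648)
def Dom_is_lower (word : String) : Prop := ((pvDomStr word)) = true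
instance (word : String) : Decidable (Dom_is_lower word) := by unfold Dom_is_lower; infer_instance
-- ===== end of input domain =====

-- B replaces A's per-character range-check loop (with early return) by a
-- build-the-set-of-distinct-characters-then-intersect-with-the-uppercase-set shape (idiomatic set formulation).

-- ===== PORT A =====
-- the for-loop with early 'return False'; carries A's constants and flag literally
def is_lower_loop (char_code_A char_code_Z : Nat) (is_all_lower : Bool) : List Char → Bool
  | [] => is_all_lower
  | c :: rest =>
      if char_code_A ≤ c.toNat ∧ c.toNat ≤ char_code_Z then false
      else is_lower_loop char_code_A char_code_Z is_all_lower rest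

def is_lower (word : String) : Bool :=
  is_lower_loop ('A').toNat ('Z').toNat true word.toList

-- ===== PORT B =====
def pvUPPER : PySem.Set Char := PySem.Set.ofList "ABCDEFGHIJKLMNOPQRSTUVWXYZ".toList

def is_lower_alt (word : String) : Bool :=
  ((PySem.Set.inter (PySem.Set.ofList word.toList) pvUPPER).isEmpty)

-- ===== PRECONDITION & SPEC =====
def Spec_is_lower (word : String) (out : Bool) : Prop := out = is_lower_alt word
instance (word : String) (out : Bool) : Decidable (Spec_is_lower word out) := by unfold Spec_is_lower; infer_instance

-- ===== CLAIM (what is proved, stated in full; the proofs are below) =====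
def Claim_equal_is_lower : Prop := ∀ (word : String), Dom_is_lower word → Spec_is_lower word (is_lower word)

-- ===== LEMMAS AND PROOFS =====

lemma mem_pvUPPER (c : Char) : c ∈ pvUPPER ↔ (65 ≤ c.toNat ∧ c.toNat ≤ 90) := by
  have hU : pvUPPER = ['A','B','C','D','E','F','G','H','I','J','K','L','M','N','O','P','Q','R','S','T','U','V','W','X','Y','Z'] := by decide
  rw [hU]
  constructor
  · intro hm
    simp only [List.mem_cons, List.not_mem_nil, or_false] at hm
    rcases hm with rfl|rfl|rfl|rfl|rfl|rfl|rfl|rfl|rfl|rfl|rfl|rfl|rfl|rfl|rfl|rfl|rfl|rfl|rfl|rfl|rfl|rfl|rfl|rfl|rfl|rfl <;> decide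
  · rintro ⟨h1, h2⟩
    have hc : c = Char.ofNat c.toNat := (Char.ofNat_toNat c).symm
    set n := c.toNat with hn
    interval_cases n <;> (rw [hc]; decide)

lemma loop_eq_all (l : List Char) :
    is_lower_loop 65 90 true l = l.all (fun c => !decide (65 ≤ c.toNat ∧ c.toNat ≤ 90)) := by
  induction l with
  | nil => rfl
  | cons c rest ih =>
      simp only [is_lower_loop]
      split_ifs with h
      · simp [h]
      · rw [ih, List.all_cons]
        simp [h]

-- ===== VERDICT (by name: the statement is the Claim_ definition above) =====
theorem is_lower_spec : Claim_equal_is_lower := by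
  intro word _
  unfold Spec_is_lower is_lower is_lower_alt
  rw [show ('A').toNat = 65 from rfl, show ('Z').toNat = 90 from rfl, loop_eq_all]
  rw [Bool.eq_iff_iff]
  simp only [List.all_eq_true, List.isEmpty_iff, List.eq_nil_iff_forall_not_mem,
    PySem.Set.mem_inter, PySem.Set.mem_ofList, mem_pvUPPER]
  constructor
  · rintro h c ⟨hc, hU⟩
    have := h c hc
    simp at this
    omega
  · intro h c hc
    simp only [Bool.not_eq_eq_eq_not, Bool.not_true, decide_eq_false_iff_not]
    exact fun hU => h c ⟨hc, hU⟩
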